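-- pv_equiv track=rewrite | github.com/gogostock1227-sys/indusmapk | concept_taxonomy/validator/tier1_rule.py | _find_earliest_keyword
-- ===== SOURCE A (Python) =====
-- def _find_earliest_keyword(text: str, keywords: list[str]) -> tuple[str, int]:
--     """找 keywords 最早出現位置。回傳 (keyword, offset)。沒命中回 ('', -1)。"""
--     if not text or not keywords:
--         return "", -1
--     earliest_kw = ""
--     earliest_idx = -1
--     for kw in keywords:
--         if not kw:
--             continue
--         idx = text.find(kw)
--         if idx >= 0 and (earliest_idx < 0 or idx < earliest_idx):
--             earliest_idx = idx
--             earliest_kw = kw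
--     return earliest_kw, earliest_idx
-- ===== SOURCE B (Python) =====
-- def _find_earliest_keyword(text: str, keywords: list[str]) -> tuple[str, int]:
--     """Position-major scan: walk the text once left to right; at each offset try the
--     keywords in list order and return the first match. Same result as keyword-major
--     min-of-find, because the first matching offset is every matching keyword's find."""
--     kws = [k for k in keywords if k]
--     for i in range(len(text)):
--         for k in kws:
--             if text.startswith(k, i):
--                 return k, i
--     return "", -1
-- ===== Notes on version B (the rewrite author's own statement) =====
-- stated objective: faster
-- what changed: Replaces A's keyword-major loop (one full text.find per keyword, keeping the minimum offset) by a position-major left-to-right walk of the text that returns at the first offset where any keyword matches, trying keywords in list order there.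
import Mathlib
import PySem

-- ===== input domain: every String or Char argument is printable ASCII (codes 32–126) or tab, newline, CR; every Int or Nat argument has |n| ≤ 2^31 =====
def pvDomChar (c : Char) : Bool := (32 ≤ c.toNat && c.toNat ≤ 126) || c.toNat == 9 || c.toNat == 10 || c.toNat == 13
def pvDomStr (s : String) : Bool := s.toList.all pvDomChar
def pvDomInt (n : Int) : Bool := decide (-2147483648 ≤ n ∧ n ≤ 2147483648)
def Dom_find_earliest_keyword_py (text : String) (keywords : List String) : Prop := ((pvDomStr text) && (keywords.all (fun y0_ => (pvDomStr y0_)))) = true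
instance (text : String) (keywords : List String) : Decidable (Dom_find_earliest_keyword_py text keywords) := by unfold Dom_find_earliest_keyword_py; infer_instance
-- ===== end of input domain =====

-- B replaces A's keyword-major min-of-find scan by a position-major single left-to-right walk
-- over the text that returns at the first offset where any keyword matches (alternative algorithm).

-- ===== PORT A =====
-- A's loop body: 'if not kw: continue; idx = text.find(kw); if idx >= 0 and (earliest_idx < 0 or idx < earliest_idx): update'
def pvStepA (s : List Char) (acc : String × Int) (kw : String) : String × Int :=
  if kw = "" then acc
  else
    let idx := PySem.Chars.find s kw.toList
    if 0 ≤ idx ∧ (acc.2 < 0 ∨ idx < acc.2) then (kw, idx) else acc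

def find_earliest_keyword_py (text : String) (keywords : List String) : String × Int :=
  if text = "" ∨ keywords = [] then ("", -1)
  else keywords.foldl (pvStepA text.toList) ("", -1)

-- ===== PORT B =====
-- inner 'for k in kws: if text.startswith(k, i): return k, i' — first keyword matching at offset i
def pvMatchAt (s : List Char) (i : Nat) : List String → Option String
  | [] => none
  | k :: ks => if PySem.Chars.startswith (s.drop i) k.toList then some k else pvMatchAt s i ks

-- outer 'for i in range(len(text))'
def pvScan (s : List Char) (kws : List String) (i : Nat) : Nat → String × Int
  | 0 => ("", -1)
  | fuel + 1 =>
    match pvMatchAt s i kws with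
    | some k => (k, (i : Int))
    | none => pvScan s kws (i + 1) fuel

def find_earliest_keyword_py_alt (text : String) (keywords : List String) : String × Int :=
  pvScan text.toList (keywords.filter (fun k => k ≠ "")) 0 text.toList.length

-- ===== PRECONDITION & SPEC =====
def Spec_find_earliest_keyword_py (text : String) (keywords : List String) (out : String × Int) : Prop := out = find_earliest_keyword_py_alt text keywords
instance (text : String) (keywords : List String) (out : String × Int) : Decidable (Spec_find_earliest_keyword_py text keywords out) := by unfold Spec_find_earliest_keyword_py; infer_instance

-- ===== CLAIM (what is proved, stated in full; the proofs are below) =====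
def Claim_equal_find_earliest_keyword_py : Prop := ∀ (text : String) (keywords : List String), Dom_find_earliest_keyword_py text keywords → Spec_find_earliest_keyword_py text keywords (find_earliest_keyword_py text keywords)

-- ===== LEMMAS AND PROOFS =====

-- reference value: A's fold, written as structural recursion (head wins ties)
def pvBest (s : List Char) : List String → String × Int
  | [] => ("", -1)
  | k :: ks =>
    let rest := pvBest s ks
    let idx := PySem.Chars.find s k.toList
    if k ≠ "" ∧ 0 ≤ idx ∧ (rest.2 < 0 ∨ idx ≤ rest.2) then (k, idx) else rest


theorem pvToList_ne_nil (k : String) (hk : k ≠ "") : k.toList ≠ [] := by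
  intro h
  exact hk (by simp_all)

theorem pvBest_neg (s : List Char) (ks : List String) (h : (pvBest s ks).2 < 0) :
    pvBest s ks = ("", -1) := by
  induction ks with
  | nil => rfl
  | cons k ks ih =>
    simp only [pvBest] at h ⊢
    split_ifs at h ⊢ with hc
    · omega
    · exact ih h

theorem pvBest_lb (s : List Char) (ks : List String) (c : Int)
    (h : ∀ k ∈ ks, k ≠ "" → PySem.Chars.find s k.toList < 0 ∨ c ≤ PySem.Chars.find s k.toList) :
    (pvBest s ks).2 < 0 ∨ c ≤ (pvBest s ks).2 := by
  induction ks with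
  | nil => simp [pvBest]
  | cons k ks ih =>
    have hk := h k (by simp)
    have ih' := ih (fun k' hk' => h k' (by simp [hk']))
    simp only [pvBest]
    split_ifs with hc
    · rcases hk hc.1 with h1 | h1
      · omega
      · exact Or.inr h1
    · exact ih'

theorem pvBest_none (s : List Char) (ks : List String)
    (h : ∀ k ∈ ks, k ≠ "" → PySem.Chars.find s k.toList < 0) :
    pvBest s ks = ("", -1) := by
  induction ks with
  | nil => rfl
  | cons k ks ih =>
    simp only [pvBest]
    split_ifs with hc
    · have := h k (by simp) hc.1
      omega
    · exact ih (fun k' hk' => h k' (by simp [hk']))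

theorem pvFoldA (s : List Char) (ks : List String) :
    ∀ acc : String × Int, ks.foldl (pvStepA s) acc =
      (if 0 ≤ (pvBest s ks).2 ∧ (acc.2 < 0 ∨ (pvBest s ks).2 < acc.2) then pvBest s ks else acc) := by
  induction ks with
  | nil => intro acc; simp [pvBest, List.foldl]
  | cons k ks ih =>
    intro acc
    rw [List.foldl_cons, ih]
    rcases hb : pvBest s ks with ⟨bk, bi⟩
    by_cases hke : k = ""
    · simp only [pvBest, pvStepA, hb, hke]
      simp
    · simp only [pvBest, pvStepA, hb, ne_eq, hke, not_false_eq_true, true_and]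
      split_ifs <;> first
        | rfl
        | omega
        | (exfalso; omega)

theorem pvBest_filter (s : List Char) (ks : List String) :
    pvBest s (ks.filter (fun k => k ≠ "")) = pvBest s ks := by
  induction ks with
  | nil => rfl
  | cons k ks ih =>
    rw [List.filter_cons]
    by_cases hke : k = ""
    · rw [if_neg (by simp [hke])]
      rw [ih]
      simp [pvBest, hke]
    · rw [if_pos (by simp [hke])]
      simp only [pvBest, ih]

theorem pvA_eq_pvBest (text : String) (keywords : List String) :
    find_earliest_keyword_py text keywords = pvBest text.toList keywords := by
  unfold find_earliest_keyword_py
  split_ifs with hg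
  · rcases hg with hg | hg
    · subst hg
      refine (pvBest_none _ _ ?_).symm
      intro k _ hk
      have hinf : ¬ k.toList <:+: (("" : String).toList) := by
        simp only [List.infix_nil, String.toList_empty]
        exact pvToList_ne_nil k hk
      have h1 := (PySem.Chars.find_eq_neg_one_iff ("" : String).toList k.toList).mpr hinf
      omega
    · subst hg; rfl
  · rw [pvFoldA]
    rcases lt_or_ge (pvBest text.toList keywords).2 0 with hneg | hpos
    · rw [pvBest_neg _ _ hneg]
      norm_num
    · rw [if_pos ⟨hpos, Or.inl (by norm_num)⟩]

theorem pvMatchAt_none (s : List Char) (i : Nat) (ks : List String)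
    (h : pvMatchAt s i ks = none) : ∀ k ∈ ks, ¬ (k.toList <+: s.drop i) := by
  induction ks with
  | nil => simp
  | cons k ks ih =>
    simp only [pvMatchAt] at h
    split_ifs at h with hc
    intro k' hk'
    rcases List.mem_cons.mp hk' with rfl | hk'
    · exact fun hp => hc ((PySem.Chars.startswith_iff _ _).mpr hp)
    · exact ih h k' hk'

theorem pvMatchAt_some (s : List Char) (i : Nat) (ks : List String) (k : String)
    (h : pvMatchAt s i ks = some k) :
    ∃ pre post, ks = pre ++ k :: post ∧ (k.toList <+: s.drop i) ∧
      ∀ k' ∈ pre, ¬ (k'.toList <+: s.drop i) := by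
  induction ks with
  | nil => simp [pvMatchAt] at h
  | cons k0 ks ih =>
    simp only [pvMatchAt] at h
    split_ifs at h with hc
    · obtain rfl : k0 = k := by simpa using h
      exact ⟨[], ks, rfl, (PySem.Chars.startswith_iff _ _).mp hc, by simp⟩
    · obtain ⟨pre, post, hsplit, hm, hpre⟩ := ih h
      refine ⟨k0 :: pre, post, by simp [hsplit], hm, ?_⟩
      intro k' hk'
      rcases List.mem_cons.mp hk' with rfl | hk'
      · exact fun hp => hc ((PySem.Chars.startswith_iff _ _).mpr hp)
      · exact hpre k' hk'

-- if a nonempty keyword matches at i and nowhere below i, its find is exactly i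
theorem pvFind_eq_of_match (s : List Char) (k : List Char) (i : Nat)
    (hmatch : k <+: s.drop i) (hbelow : ∀ j, j < i → ¬ (k <+: s.drop j)) :
    PySem.Chars.find s k = (i : Int) := by
  have hinf : k <:+: s := by
    have : ∃ j, k <+: s.drop j := ⟨i, hmatch⟩
    exact (PySem.Chars.isIn_iff_infix k s).mp ((PySem.Chars.exists_prefix_drop_iff_isIn k s).mp this)
  have hnn : 0 ≤ PySem.Chars.find s k := (PySem.Chars.find_nonneg_iff _ _).mpr hinf
  obtain ⟨hpref, hmin⟩ := PySem.Chars.find_spec (s := s) (sub := k) hnn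
  have h1 : ¬ ((PySem.Chars.find s k).toNat < i) := fun h => hbelow _ h hpref
  have h2 : ¬ (i < (PySem.Chars.find s k).toNat) := fun h => hmin i h hmatch
  omega

theorem pvBest_pinpoint (s : List Char) (pre post : List String) (k : String) (i : Nat)
    (hk : k ≠ "") (hfind : PySem.Chars.find s k.toList = (i : Int))
    (hpre : ∀ k' ∈ pre, k' ≠ "" →
      PySem.Chars.find s k'.toList < 0 ∨ (i : Int) < PySem.Chars.find s k'.toList)
    (hpost : ∀ k' ∈ post, k' ≠ "" →
      PySem.Chars.find s k'.toList < 0 ∨ (i : Int) ≤ PySem.Chars.find s k'.toList) :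
    pvBest s (pre ++ k :: post) = (k, (i : Int)) := by
  induction pre with
  | nil =>
    simp only [List.nil_append, pvBest]
    have hrest := pvBest_lb s post (i : Int) hpost
    rw [if_pos ⟨hk, by omega, by omega⟩, hfind]
  | cons k0 pre ih =>
    have ih' := ih (fun k' hk' => hpre k' (by simp [hk']))
    simp only [List.cons_append, pvBest, ih']
    split_ifs with hc
    · exfalso
      have := hpre k0 (by simp) hc.1
      rcases hc.2.2 with h | h <;> omega
    · rfl

theorem pvScan_eq (s : List Char) (kws : List String)
    (hne : ∀ k ∈ kws, k ≠ "") :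
    ∀ fuel i, i + fuel = s.length →
      (∀ j, j < i → ∀ k ∈ kws, ¬ (k.toList <+: s.drop j)) →
      pvScan s kws i fuel = pvBest s kws := by
  intro fuel
  induction fuel with
  | zero =>
    intro i hlen hinv
    refine (pvBest_none s kws ?_).symm
    intro k hk hke
    have hnm : ∀ j, ¬ (k.toList <+: s.drop j) := by
      intro j hp
      by_cases hj : j < i
      · exact hinv j hj k hk hp
      · have : s.drop j = [] := List.drop_eq_nil_of_le (by omega)
        rw [this, List.prefix_nil] at hp
        exact pvToList_ne_nil k hke hp
    have hinf : ¬ k.toList <:+: s := by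
      intro hinf
      have := (PySem.Chars.exists_prefix_drop_iff_isIn k.toList s).mpr
        ((PySem.Chars.isIn_iff_infix k.toList s).mpr hinf)
      obtain ⟨j, hj⟩ := this
      exact hnm j hj
    have := (PySem.Chars.find_eq_neg_one_iff (s := s) (sub := k.toList)).mpr hinf
    omega
  | succ fuel ih =>
    intro i hlen hinv
    simp only [pvScan]
    rcases hm : pvMatchAt s i kws with _ | k
    · exact ih (i + 1) (by omega) (by
        intro j hj k hk
        rcases Nat.lt_succ_iff_lt_or_eq.mp hj with hj' | hj'
        · exact hinv j hj' k hk
        · subst hj'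
          exact pvMatchAt_none s j kws hm k hk)
    · obtain ⟨pre, post, hsplit, hmatch, hpre⟩ := pvMatchAt_some s i kws k hm
      have hkmem : k ∈ kws := by rw [hsplit]; simp
      have hkne := hne k hkmem
      have hfind : PySem.Chars.find s k.toList = (i : Int) :=
        pvFind_eq_of_match s k.toList i hmatch (fun j hj => hinv j hj k hkmem)
      rw [hsplit]
      refine (pvBest_pinpoint s pre post k i hkne hfind ?_ ?_).symm
      · intro k' hk' hk'e
        have hmem' : k' ∈ kws := by rw [hsplit]; simp [hk']
        by_cases hnn : 0 ≤ PySem.Chars.find s k'.toList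
        · right
          obtain ⟨hpref, _⟩ := PySem.Chars.find_spec (s := s) (sub := k'.toList) hnn
          have h1 : ¬ ((PySem.Chars.find s k'.toList).toNat < i) := fun h =>
            hinv _ h k' hmem' hpref
          have h2 : (PySem.Chars.find s k'.toList).toNat ≠ i := by
            intro h
            exact hpre k' hk' (by rwa [h] at hpref)
          omega
        · left; omega
      · intro k' hk' hk'e
        have hmem' : k' ∈ kws := by rw [hsplit]; simp [hk']
        by_cases hnn : 0 ≤ PySem.Chars.find s k'.toList
        · right
          obtain ⟨hpref, _⟩ := PySem.Chars.find_spec (s := s) (sub := k'.toList) hnn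
          have h1 : ¬ ((PySem.Chars.find s k'.toList).toNat < i) := fun h =>
            hinv _ h k' hmem' hpref
          omega
        · left; omega

theorem pvB_eq_pvBest (text : String) (keywords : List String) :
    find_earliest_keyword_py_alt text keywords = pvBest text.toList keywords := by
  unfold find_earliest_keyword_py_alt
  rw [pvScan_eq text.toList (keywords.filter (fun k => k ≠ ""))
      (by intro k hk; exact of_decide_eq_true (List.mem_filter.mp hk).2)
      text.toList.length 0 (by omega) (by intro j hj; omega)]
  exact pvBest_filter text.toList keywords

-- ===== VERDICT (by name: the statement is the Claim_ definition above) =====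
theorem find_earliest_keyword_py_spec : Claim_equal_find_earliest_keyword_py := by
  intro text keywords _
  unfold Spec_find_earliest_keyword_py
  rw [pvA_eq_pvBest, pvB_eq_pvBest]
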